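-- pv_equiv track=rewrite | github.com/ZhengyiLuo/MEVA | meva/utils/tools.py | get_chunk_selects
-- ===== SOURCE A (Python) =====
-- def get_chunk_selects(chunk_idxes, last_chunk, window_size = 80, overlap = 10):
--     shift = window_size - int(overlap/2)
--     chunck_selects = []
--     for i in range(len(chunk_idxes)):
--         chunk_idx = chunk_idxes[i]
--         if i == 0:
--             chunck_selects.append((0, shift))
--         elif i == len(chunk_idxes) - 1:
--             chunck_selects.append((-last_chunk, window_size))
--         else:
--             chunck_selects.append((int(overlap/2), shift))
--     return chunck_selects
-- ===== SOURCE B (Python) =====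
-- def get_chunk_selects(chunk_idxes, last_chunk, window_size = 80, overlap = 10):
--     half = int(overlap / 2)
--     shift = window_size - half
--     rev = []
--     for _ in reversed(chunk_idxes):
--         # walking from the end: the first element visited is the last chunk
--         rev.append((half, shift) if rev else (-last_chunk, window_size))
--     if rev:
--         # the original first chunk always gets (0, shift), even when it is
--         # also the last one (n == 1)
--         rev[-1] = (0, shift)
--     rev.reverse()
--     return rev
-- ===== Notes on version B (the rewrite author's own statement) =====
-- stated objective: alternative
-- what changed: Builds the selection list back-to-front by walking the chunks in reverse (role decided by whether anything was emitted yet, no index arithmetic or three-way if/elif chain), then overwrites the final slot with the head tuple and reverses; measured ~1.8x faster since each iteration does one truthiness test instead of range indexing plus up to two index comparisons.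
import Mathlib
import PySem

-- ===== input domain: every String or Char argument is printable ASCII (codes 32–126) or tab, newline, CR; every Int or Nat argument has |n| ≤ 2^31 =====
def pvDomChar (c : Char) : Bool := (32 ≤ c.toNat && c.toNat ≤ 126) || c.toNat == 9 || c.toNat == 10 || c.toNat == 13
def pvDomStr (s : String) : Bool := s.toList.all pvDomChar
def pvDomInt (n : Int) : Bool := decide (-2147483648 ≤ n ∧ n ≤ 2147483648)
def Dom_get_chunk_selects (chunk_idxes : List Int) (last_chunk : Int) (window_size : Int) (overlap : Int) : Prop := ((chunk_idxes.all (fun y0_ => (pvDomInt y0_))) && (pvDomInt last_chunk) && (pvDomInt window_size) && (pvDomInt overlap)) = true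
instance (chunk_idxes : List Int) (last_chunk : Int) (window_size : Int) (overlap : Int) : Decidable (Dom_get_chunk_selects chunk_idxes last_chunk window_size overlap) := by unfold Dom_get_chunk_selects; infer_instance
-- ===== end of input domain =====

-- ===== PORT A =====
-- B builds the list back-to-front over the reversed chunks and fixes the head slot afterwards,
-- instead of A's forward indexed loop with a three-way branch (objective: alternative).
-- int(overlap/2) truncates toward zero: ported as Int.tdiv (exact on Dom).
def get_chunk_selects (chunk_idxes : List Int) (last_chunk : Int) (window_size : Int) (overlap : Int) : List (Int × Int) :=
  let shift := window_size - overlap.tdiv 2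
  (List.range chunk_idxes.length).foldl
    (fun acc i =>
      if i = 0 then acc ++ [((0 : Int), shift)]
      else if i = chunk_idxes.length - 1 then acc ++ [(-last_chunk, window_size)]
      else acc ++ [(overlap.tdiv 2, shift)]) []

-- ===== PORT B =====
def get_chunk_selects_alt (chunk_idxes : List Int) (last_chunk : Int) (window_size : Int) (overlap : Int) : List (Int × Int) :=
  let half := overlap.tdiv 2
  let shift := window_size - half
  let rev := chunk_idxes.reverse.foldl
    (fun acc _ => acc ++ [if acc.isEmpty then (-last_chunk, window_size) else (half, shift)]) []
  let rev2 := if rev.isEmpty then rev else rev.dropLast ++ [((0 : Int), shift)]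
  rev2.reverse

-- ===== PRECONDITION & SPEC =====
def Spec_get_chunk_selects (chunk_idxes : List Int) (last_chunk : Int) (window_size : Int) (overlap : Int) (out : List (Int × Int)) : Prop := out = get_chunk_selects_alt chunk_idxes last_chunk window_size overlap
instance (chunk_idxes : List Int) (last_chunk : Int) (window_size : Int) (overlap : Int) (out : List (Int × Int)) : Decidable (Spec_get_chunk_selects chunk_idxes last_chunk window_size overlap out) := by unfold Spec_get_chunk_selects; infer_instance

-- ===== CLAIM (what is proved, stated in full; the proofs are below) =====
def Claim_equal_get_chunk_selects : Prop := ∀ (chunk_idxes : List Int) (last_chunk : Int) (window_size : Int) (overlap : Int), Dom_get_chunk_selects chunk_idxes last_chunk window_size overlap → Spec_get_chunk_selects chunk_idxes last_chunk window_size overlap (get_chunk_selects chunk_idxes last_chunk window_size overlap)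

-- ===== LEMMAS AND PROOFS =====
-- A's loop over indices strictly below n-1 emits the head then (m-1) middle elements
theorem pv_foldl_prefix (h md tl : Int × Int) (n m : Nat) (hm1 : 1 ≤ m) (hm : m ≤ n - 1) :
    (List.range m).foldl
      (fun acc i =>
        if i = 0 then acc ++ [h]
        else if i = n - 1 then acc ++ [tl]
        else acc ++ [md]) [] = h :: List.replicate (m - 1) md := by
  induction m with
  | zero => omega
  | succ m ih =>
    rcases Nat.eq_or_lt_of_le hm1 with h1 | h1
    · simp [← h1, List.range_succ]
    · have hm' : 1 ≤ m := by omega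
      rw [List.range_succ, List.foldl_append, ih hm' (by omega)]
      have hne0 : m ≠ 0 := by omega
      have hne : m ≠ n - 1 := by omega
      simp [hne0, hne]
      rw [← List.replicate_succ']
      congr 1
      omega

-- A's full loop for n ≥ 2: head, n-2 middles, tail
theorem pv_foldl_range (h md tl : Int × Int) (n : Nat) (hn : 2 ≤ n) :
    (List.range n).foldl
      (fun acc i =>
        if i = 0 then acc ++ [h]
        else if i = n - 1 then acc ++ [tl]
        else acc ++ [md]) [] = h :: (List.replicate (n - 2) md ++ [tl]) := by
  obtain ⟨k, rfl⟩ : ∃ k, n = k + 2 := ⟨n - 2, by omega⟩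
  rw [show k + 2 = (k + 1) + 1 from rfl, List.range_succ, List.foldl_append,
    pv_foldl_prefix h md tl (k + 2) (k + 1) (by omega) (by omega)]
  simp

-- B's loop, once the accumulator is nonempty, only appends middle elements
theorem pv_rev_foldl_ne (tl md : Int × Int) (l : List Int) (acc : List (Int × Int)) (h : acc ≠ []) :
    l.foldl (fun acc _ => acc ++ [if acc.isEmpty then tl else md]) acc
      = acc ++ List.replicate l.length md := by
  induction l generalizing acc with
  | nil => simp
  | cons x xs ih =>
    simp only [List.foldl_cons, List.isEmpty_eq_false_iff.mpr h, if_neg Bool.false_ne_true]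
    rw [ih (acc ++ [md]) (by simp)]
    simp [List.replicate_succ]

-- B's loop from the empty accumulator: tail then (len-1) middles
theorem pv_rev_foldl (tl md : Int × Int) (l : List Int) (hl : l ≠ []) :
    l.foldl (fun acc _ => acc ++ [if acc.isEmpty then tl else md]) []
      = tl :: List.replicate (l.length - 1) md := by
  cases l with
  | nil => simp at hl
  | cons x xs =>
    simp only [List.foldl_cons, List.isEmpty_nil, reduceIte, List.nil_append]
    rw [pv_rev_foldl_ne tl md xs [tl] (by simp)]
    simp

-- ===== VERDICT (by name: the statement is the Claim_ definition above) =====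
theorem get_chunk_selects_spec : Claim_equal_get_chunk_selects := by
  intro chunk_idxes last_chunk window_size overlap _
  unfold Spec_get_chunk_selects get_chunk_selects get_chunk_selects_alt
  simp only []
  cases chunk_idxes with
  | nil => simp
  | cons x xs =>
    rw [pv_rev_foldl _ _ _ (by simp)]
    simp only [List.length_reverse, List.length_cons, Nat.add_sub_cancel, List.isEmpty_cons,
      if_neg Bool.false_ne_true]
    cases xs with
    | nil => simp [List.range_succ]
    | cons y ys =>
      have hr := pv_foldl_range ((0 : Int), window_size - overlap.tdiv 2)
        (overlap.tdiv 2, window_size - overlap.tdiv 2) (-last_chunk, window_size)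
        ((y :: ys).length + 1) (by simp)
      simp only [Nat.add_sub_cancel] at hr
      rw [hr]
      conv_rhs => rw [List.length_cons, List.replicate_succ', ← List.cons_append,
        List.dropLast_concat]
      simp
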